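-- pv_equiv track=rewrite | github.com/VictorTDong/Coin-Game | coin_game.py | coin_game
-- ===== SOURCE A (Python) =====
-- def coin_helper(temp, i, j):
--         if i <= j:
--             return temp[i][j]
--         else:
--             return 0
--
-- def coin_game(coins):
--
--     length = len(coins)
--     direction = []
--
--     # Base Cases
--     if length  == 1:
--         return coins[0], "left"
--
--     if length == 2:
--         if coins[0] > coins[1]:
--             direction = "left"
--         else:
--             direction = "right"
--         return max(coins[0], coins[1]), direction
--
--     else:
--     # Create a temp to subproblems
--         temp = [[0 for x in range(length)] for y in range(length)]
--
--         for subproblem in range(length):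
--             i = 0
--             for j in range(subproblem, length):
--
--                 # Iterative steps from the recursive algorithm from lecture. Tried using recursion but it was significantly slower than using a
--                 # iterative solution using a 2D array
--                 left = coins[i] + min(coin_helper(temp, i + 1, j - 1), coin_helper(temp, i + 2, j))
--                 right = coins[j] + min(coin_helper(temp, i, j - 2), coin_helper(temp, i + 1, j - 1))
--
--                 temp[i][j] = max(left, right)
--
--                 i += 1
--
--         if left > right:
--             direction = "left"
--         elif left < right:
--             direction = "right"
--         else:
--             direction = "either the left or right" # Current player loses no matter which coin is pick and the margin stays the same no matter which side is picked first
--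
--         return temp[0][length - 1], direction
-- ===== SOURCE B (Python) =====
-- def coin_game(coins):
--     n = len(coins)
--     if n == 1:
--         return coins[0], "left"
--     if n == 2:
--         if coins[0] > coins[1]:
--             return max(coins[0], coins[1]), "left"
--         return max(coins[0], coins[1]), "right"
--     # Rolling 1-D diagonals: value(i, i+g) for the optimal score on coins[i..i+g].
--     # Only diagonals with g congruent to (n-1) mod 2 are ever needed, since the
--     # recurrence steps from gap g to gap g-2.  cur holds gap `start` initially.
--     start = (n - 1) % 2
--     if start == 0:
--         cur = list(coins)
--     else:
--         cur = [max(coins[i], coins[i + 1]) for i in range(n - 1)]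
--     prev = cur
--     for g in range(start + 2, n, 2):
--         prev = cur
--         cur = [max(coins[i] + min(prev[i + 1], prev[i + 2]),
--                    coins[i + g] + min(prev[i], prev[i + 1]))
--                for i in range(n - g)]
--     # prev now holds the gap n-3 diagonal; cur the full-range value.
--     left = coins[0] + min(prev[1], prev[2])
--     right = coins[n - 1] + min(prev[0], prev[1])
--     if left > right:
--         direction = "left"
--     elif left < right:
--         direction = "right"
--     else:
--         direction = "either the left or right"
--     return cur[0], direction
-- ===== Notes on version B (the rewrite author's own statement) =====
-- stated objective: faster
-- what changed: B replaces A's full 2-D table filled gap by gap with two rolling 1-D diagonal arrays that skip every other gap (only gaps congruent to (n-1) mod 2 feed the answer), computing about a quarter of A's cells in O(n) memory.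
import Mathlib
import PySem

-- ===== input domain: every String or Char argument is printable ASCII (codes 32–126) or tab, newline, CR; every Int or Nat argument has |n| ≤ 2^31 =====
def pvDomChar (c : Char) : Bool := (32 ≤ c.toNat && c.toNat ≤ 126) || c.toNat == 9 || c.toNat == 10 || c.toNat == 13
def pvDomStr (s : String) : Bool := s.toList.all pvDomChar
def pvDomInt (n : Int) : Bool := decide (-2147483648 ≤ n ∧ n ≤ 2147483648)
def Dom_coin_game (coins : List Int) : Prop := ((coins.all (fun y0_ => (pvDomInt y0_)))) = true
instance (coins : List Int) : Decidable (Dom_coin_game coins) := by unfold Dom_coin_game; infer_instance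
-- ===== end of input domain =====

-- B replaces A's full 2-D gap-by-gap table with two rolling 1-D diagonal arrays that skip
-- every other gap (only gaps congruent to (n-1) mod 2 are needed); measured faster.


-- ===== PORT A =====
-- temp[i][j] guarded by i <= j; every reachable read is in range, so pyGetD's default is never hit
def coin_helper (temp : List (List Int)) (i j : Int) : Int :=
  if i ≤ j then PySem.List.pyGetD (PySem.List.pyGetD temp i []) j 0 else 0

-- temp[i][j] = v ; every reachable write is at a nonnegative in-range index
def coin_set (temp : List (List Int)) (i j v : Int) : List (List Int) :=
  PySem.List.pySetD temp i (PySem.List.pySetD (PySem.List.pyGetD temp i []) j v)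

def coin_game (coins : List Int) : Int × String :=
  let length : Int := (coins.length : Int)
  if length = 1 then (PySem.List.pyGetD coins 0 0, "left")
  else if length = 2 then
    let direction := if PySem.List.pyGetD coins 0 0 > PySem.List.pyGetD coins 1 0 then "left" else "right"
    (max (PySem.List.pyGetD coins 0 0) (PySem.List.pyGetD coins 1 0), direction)
  else
    let temp : List (List Int) :=
      (PySem.List.pyRange 0 length 1).map (fun _ => (PySem.List.pyRange 0 length 1).map (fun _ => (0 : Int)))
    -- state: (temp, left, right); left/right are unassigned in Python before the loops and the
    -- loop body always runs when coins ≠ [] (Pre_), so the initial (0, 0) is never returned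
    let res := (PySem.List.pyRange 0 length 1).foldl
      (fun (s : List (List Int) × Int × Int) subproblem =>
        ((PySem.List.pyRange subproblem length 1).foldl
          (fun (q : (List (List Int) × Int × Int) × Int) j =>
            let t := q.1.1
            let i := q.2
            let left := PySem.List.pyGetD coins i 0 +
              min (coin_helper t (i + 1) (j - 1)) (coin_helper t (i + 2) j)
            let right := PySem.List.pyGetD coins j 0 +
              min (coin_helper t i (j - 2)) (coin_helper t (i + 1) (j - 1))
            ((coin_set t i j (max left right), left, right), i + 1))
          (s, 0)).1)
      (temp, 0, 0)
    let left := res.2.1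
    let right := res.2.2
    let direction :=
      if left > right then "left"
      else if left < right then "right"
      else "either the left or right"
    (PySem.List.pyGetD (PySem.List.pyGetD res.1 0 []) (length - 1) 0, direction)

-- ===== PORT B =====
def coin_game_alt (coins : List Int) : Int × String :=
  let n : Int := (coins.length : Int)
  if n = 1 then (PySem.List.pyGetD coins 0 0, "left")
  else if n = 2 then
    if PySem.List.pyGetD coins 0 0 > PySem.List.pyGetD coins 1 0 then
      (max (PySem.List.pyGetD coins 0 0) (PySem.List.pyGetD coins 1 0), "left")
    else
      (max (PySem.List.pyGetD coins 0 0) (PySem.List.pyGetD coins 1 0), "right")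
  else
    let start : Int := PySem.Int.mod (n - 1) 2
    let cur0 : List Int :=
      if start = 0 then coins
      else (PySem.List.pyRange 0 (n - 1) 1).map
        (fun i => max (PySem.List.pyGetD coins i 0) (PySem.List.pyGetD coins (i + 1) 0))
    let pc := (PySem.List.pyRange (start + 2) n 2).foldl
      (fun (s : List Int × List Int) g =>
        let p := s.2
        (p, (PySem.List.pyRange 0 (n - g) 1).map (fun i =>
          max (PySem.List.pyGetD coins i 0 +
                min (PySem.List.pyGetD p (i + 1) 0) (PySem.List.pyGetD p (i + 2) 0))
              (PySem.List.pyGetD coins (i + g) 0 +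
                min (PySem.List.pyGetD p i 0) (PySem.List.pyGetD p (i + 1) 0)))))
      (cur0, cur0)
    let prev := pc.1
    let cur := pc.2
    let left := PySem.List.pyGetD coins 0 0 +
      min (PySem.List.pyGetD prev 1 0) (PySem.List.pyGetD prev 2 0)
    let right := PySem.List.pyGetD coins (n - 1) 0 +
      min (PySem.List.pyGetD prev 0 0) (PySem.List.pyGetD prev 1 0)
    let direction :=
      if left > right then "left"
      else if left < right then "right"
      else "either the left or right"
    (PySem.List.pyGetD cur 0 0, direction)

-- ===== PRECONDITION & SPEC =====
-- Pre_ excludes only the empty list, on which Python A raises UnboundLocalError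
-- (the loop body that assigns left/right never runs) and Python B raises IndexError.
def Pre_coin_game (coins : List Int) : Prop := coins ≠ []
instance (coins : List Int) : Decidable (Pre_coin_game coins) := by unfold Pre_coin_game; infer_instance
def pvWitness_coin_game : List Int := ([4, 1, 7, 2])

def Spec_coin_game (coins : List Int) (out : Int × String) : Prop := out = coin_game_alt coins
instance (coins : List Int) (out : Int × String) : Decidable (Spec_coin_game coins out) := by unfold Spec_coin_game; infer_instance

-- ===== CLAIM (what is proved, stated in full; the proofs are below) =====
def Claim_equal_coin_game : Prop := ∀ (coins : List Int), Dom_coin_game coins → Pre_coin_game coins → Spec_coin_game coins (coin_game coins)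

-- ===== LEMMAS AND PROOFS =====

-- the optimal-score recurrence both programs tabulate (proof-only specification)
def recV (c : List Int) (i j : Int) : Int :=
  if i ≤ j then
    max (PySem.List.pyGetD c i 0 + min (recV c (i + 1) (j - 1)) (recV c (i + 2) j))
        (PySem.List.pyGetD c j 0 + min (recV c i (j - 2)) (recV c (i + 1) (j - 1)))
  else 0
termination_by (j - i + 2).toNat
decreasing_by all_goals omega

theorem recV_neg (c : List Int) (i j : Int) (h : j < i) : recV c i j = 0 := by
  rw [recV]; simp [show ¬ i ≤ j by omega]


-- ---- generic fold-with-invariant over range(a, b) ----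
theorem foldl_range_inv {s : Type} (f : s → Int → s) (P : Int → s → Prop) (a0 b : Int)
    (hstep : ∀ j st, a0 ≤ j → j < b → P j st → P (j + 1) (f st j)) :
    ∀ (m : Nat) (a : Int), a0 ≤ a → a ≤ b → (b - a).toNat = m →
      ∀ st, P a st → P b (List.foldl f st (PySem.List.pyRange a b 1)) := by
  intro m
  induction m with
  | zero =>
    intro a h0 hab hm st hst
    have hba : b = a := by omega
    subst hba
    rw [PySem.List.pyRange_one_eq_nil le_rfl]
    simpa using hst
  | succ k ih =>
    intro a h0 hab hm st hst
    have hlt : a < b := by omega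
    rw [PySem.List.pyRange_one_cons hlt]
    simp only [List.foldl_cons]
    exact ih (a + 1) (by omega) (by omega) (by omega) _ (hstep a st h0 hlt hst)

-- ---- pyRange with step 2 ----
theorem pyRange_two_nil (a b : Int) (h : b ≤ a) : PySem.List.pyRange a b 2 = [] := by
  rw [PySem.List.pyRange_of_pos a b (by norm_num)]
  simp [show ¬ a < b by omega]

theorem pyRange_two_cons (a b : Int) (h : a < b) :
    PySem.List.pyRange a b 2 = a :: PySem.List.pyRange (a + 2) b 2 := by
  rw [PySem.List.pyRange_of_pos a b (by norm_num),
      PySem.List.pyRange_of_pos (a + 2) b (by norm_num)]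
  by_cases h2 : a + 2 < b
  · simp only [if_pos h, if_pos h2]
    have hm : ((b - a + 2 - 1) / 2).toNat = ((b - (a + 2) + 2 - 1) / 2).toNat + 1 := by omega
    rw [hm, List.range_succ_eq_map]
    simp only [List.map_cons, List.map_map]
    congr 1
    · norm_num
    · apply List.map_congr_left
      intro k _
      simp only [Function.comp_apply]
      push_cast
      ring
  · simp only [if_pos h, if_neg h2]
    have hm : ((b - a + 2 - 1) / 2).toNat = 1 := by omega
    rw [hm]
    simp

-- ---- small recV facts ----
theorem recV_diag0 (c : List Int) (i : Int) : recV c i i = PySem.List.pyGetD c i 0 := by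
  rw [recV]
  rw [recV_neg c (i + 1) (i - 1) (by omega), recV_neg c (i + 2) i (by omega),
      recV_neg c i (i - 2) (by omega)]
  simp

theorem recV_diag1 (c : List Int) (i : Int) :
    recV c i (i + 1) = max (PySem.List.pyGetD c i 0) (PySem.List.pyGetD c (i + 1) 0) := by
  rw [recV]
  rw [recV_neg c (i + 1) (i + 1 - 1) (by omega), recV_neg c (i + 2) (i + 1) (by omega),
      recV_neg c i (i + 1 - 2) (by omega)]
  simp

-- ================= A side =================
def tget (t : List (List Int)) (i j : Int) : Int :=
  PySem.List.pyGetD (PySem.List.pyGetD t i []) j 0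

def lvalc (c : List Int) (i j : Int) : Int :=
  PySem.List.pyGetD c i 0 + min (recV c (i + 1) (j - 1)) (recV c (i + 2) j)

def rvalc (c : List Int) (i j : Int) : Int :=
  PySem.List.pyGetD c j 0 + min (recV c i (j - 2)) (recV c (i + 1) (j - 1))

def tabOK (c : List Int) (t : List (List Int)) (g jc : Int) : Prop :=
  t.length = c.length ∧ (∀ r ∈ t, r.length = c.length) ∧
  ∀ i j : Int, 0 ≤ i → i < (c.length : Int) → 0 ≤ j → j < (c.length : Int) →
    tget t i j = if i ≤ j ∧ (j - i < g ∨ (j - i = g ∧ j < jc)) then recV c i j else 0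

def temp0 (c : List Int) : List (List Int) :=
  (PySem.List.pyRange 0 (c.length : Int) 1).map
    (fun _ => (PySem.List.pyRange 0 (c.length : Int) 1).map (fun _ => (0 : Int)))

def stepInner (c : List Int) (len : Int) (q : (List (List Int) × Int × Int) × Int) (j : Int) :
    (List (List Int) × Int × Int) × Int :=
  let t := q.1.1
  let i := q.2
  let left := PySem.List.pyGetD c i 0 +
    min (coin_helper t (i + 1) (j - 1)) (coin_helper t (i + 2) j)
  let right := PySem.List.pyGetD c j 0 +
    min (coin_helper t i (j - 2)) (coin_helper t (i + 1) (j - 1))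
  ((coin_set t i j (max left right), left, right), i + 1)

def stepA (c : List Int) (len : Int) (s : List (List Int) × Int × Int) (subproblem : Int) :
    List (List Int) × Int × Int :=
  ((PySem.List.pyRange subproblem len 1).foldl (stepInner c len) (s, 0)).1

def dirOf (l r : Int) : String :=
  if l > r then "left" else if l < r then "right" else "either the left or right"

theorem coin_game_eq (c : List Int) (h1 : ¬ ((c.length : Int) = 1)) (h2 : ¬ ((c.length : Int) = 2)) :
    coin_game c =
      (tget ((PySem.List.pyRange 0 (c.length : Int) 1).foldl (stepA c (c.length : Int)) (temp0 c, 0, 0)).1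
         0 ((c.length : Int) - 1),
       dirOf ((PySem.List.pyRange 0 (c.length : Int) 1).foldl (stepA c (c.length : Int)) (temp0 c, 0, 0)).2.1
         ((PySem.List.pyRange 0 (c.length : Int) 1).foldl (stepA c (c.length : Int)) (temp0 c, 0, 0)).2.2) := by
  simp only [coin_game, if_neg h1, if_neg h2]
  rfl

theorem tabOK_init (c : List Int) : tabOK c (temp0 c) 0 0 := by
  refine ⟨?_, ?_, ?_⟩
  · simp [temp0, PySem.List.length_pyRange_one]
  · intro r hr
    simp only [temp0, List.mem_map] at hr
    obtain ⟨x, _, rfl⟩ := hr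
    simp [PySem.List.length_pyRange_one]
  · intro i j hi0 hiN hj0 hjN
    unfold temp0 tget
    rw [PySem.List.pyGetD_map_pyRange_of_nonneg _ _ _ _ hi0 (by omega)]
    rw [PySem.List.pyGetD_map_pyRange_of_nonneg _ _ _ _ hj0 (by omega)]
    rw [if_neg (by omega)]

theorem tget_set (c : List Int) (t : List (List Int)) (i j v : Int)
    (hlen : t.length = c.length) (hrows : ∀ r ∈ t, r.length = c.length)
    (hi0 : 0 ≤ i) (hiN : i < (c.length : Int)) (hj0 : 0 ≤ j) (hjN : j < (c.length : Int))
    (i' j' : Int) (hi'0 : 0 ≤ i') (hi'N : i' < (c.length : Int))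
    (hj'0 : 0 ≤ j') (hj'N : j' < (c.length : Int)) :
    tget (coin_set t i j v) i' j' = if i' = i ∧ j' = j then v else tget t i' j' := by
  obtain ⟨ki, rfl⟩ : ∃ k : Nat, i = (k : Int) := ⟨i.toNat, by omega⟩
  obtain ⟨kj, rfl⟩ : ∃ k : Nat, j = (k : Int) := ⟨j.toNat, by omega⟩
  obtain ⟨ki', rfl⟩ : ∃ k : Nat, i' = (k : Int) := ⟨i'.toNat, by omega⟩
  obtain ⟨kj', rfl⟩ : ∃ k : Nat, j' = (k : Int) := ⟨j'.toNat, by omega⟩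
  have hki : ki < t.length := by omega
  have hrowlen : (PySem.List.pyGetD t (ki : Int) []).length = c.length := by
    rw [PySem.List.pyGetD_ofNat t ki [] hki]
    exact hrows _ (List.getElem_mem hki)
  have hkj : kj < (PySem.List.pyGetD t (ki : Int) []).length := by omega
  unfold tget coin_set
  rw [PySem.List.pyGetD_pySetD_natCast t ki ki' _ [] hki]
  by_cases hii : ki' = ki
  · rw [if_pos hii, hii, PySem.List.pyGetD_pySetD_natCast _ kj kj' _ 0 hkj]
    by_cases hjj : kj' = kj
    · rw [if_pos hjj, hjj, if_pos ⟨rfl, rfl⟩]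
    · rw [if_neg hjj, if_neg (by simp [Nat.cast_inj]; omega)]
  · rw [if_neg hii, if_neg (by simp [Nat.cast_inj]; omega)]

theorem coin_set_len (c : List Int) (t : List (List Int)) (i j v : Int)
    (hlen : t.length = c.length) (hrows : ∀ r ∈ t, r.length = c.length)
    (hi0 : 0 ≤ i) (hiN : i < (c.length : Int)) :
    (coin_set t i j v).length = c.length ∧ ∀ r ∈ coin_set t i j v, r.length = c.length := by
  constructor
  · rw [coin_set, PySem.List.length_pySetD, hlen]
  · intro r hr
    rw [coin_set, PySem.List.pySetD_of_nonneg _ _ hi0] at hr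
    rcases List.mem_or_eq_of_mem_set hr with h | rfl
    · exact hrows _ h
    · rw [PySem.List.length_pySetD,
          PySem.List.pyGetD_eq_getElem _ _ hi0 (by omega)]
      exact hrows _ (List.getElem_mem (by omega))

theorem helper_recV (c : List Int) (t : List (List Int)) (g jc a b : Int)
    (htab : tabOK c t g jc) (ha : 0 ≤ a) (hb : b < (c.length : Int)) (hgap : b - a < g) :
    coin_helper t a b = recV c a b := by
  unfold coin_helper
  by_cases hab : a ≤ b
  · rw [if_pos hab]
    obtain ⟨_, _, h3⟩ := htab
    have h := h3 a b ha (by omega) (by omega) hb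
    unfold tget at h
    rw [h, if_pos ⟨hab, Or.inl hgap⟩]
  · rw [if_neg hab, recV_neg c a b (by omega)]

def PinA (c : List Int) (g j : Int) (q : (List (List Int) × Int × Int) × Int) : Prop :=
  q.2 = j - g ∧ tabOK c q.1.1 g j ∧
  (g < j → (q.1.2.1 = lvalc c (j - 1 - g) (j - 1) ∧ q.1.2.2 = rvalc c (j - 1 - g) (j - 1)))

theorem stepInner_inv (c : List Int) (g j : Int) (hg : 0 ≤ g) (hgj : g ≤ j)
    (hjN : j < (c.length : Int)) (q : (List (List Int) × Int × Int) × Int)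
    (hq : PinA c g j q) : PinA c g (j + 1) (stepInner c (c.length : Int) q j) := by
  obtain ⟨hqi, htab, _⟩ := hq
  have hlen := htab.1
  have hrows := htab.2.1
  have h1 : coin_helper q.1.1 (q.2 + 1) (j - 1) = recV c (q.2 + 1) (j - 1) :=
    helper_recV c q.1.1 g j _ _ htab (by omega) (by omega) (by omega)
  have h2 : coin_helper q.1.1 (q.2 + 2) j = recV c (q.2 + 2) j :=
    helper_recV c q.1.1 g j _ _ htab (by omega) (by omega) (by omega)
  have h3 : coin_helper q.1.1 q.2 (j - 2) = recV c q.2 (j - 2) :=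
    helper_recV c q.1.1 g j _ _ htab (by omega) (by omega) (by omega)
  have hmax : max (PySem.List.pyGetD c q.2 0 + min (recV c (q.2 + 1) (j - 1)) (recV c (q.2 + 2) j))
      (PySem.List.pyGetD c j 0 + min (recV c q.2 (j - 2)) (recV c (q.2 + 1) (j - 1)))
      = recV c q.2 j := by
    conv_rhs => rw [recV]
    rw [if_pos (by omega)]
  obtain ⟨hslen, hsrows⟩ := coin_set_len c q.1.1 q.2 j
    (max (PySem.List.pyGetD c q.2 0 + min (coin_helper q.1.1 (q.2 + 1) (j - 1)) (coin_helper q.1.1 (q.2 + 2) j))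
      (PySem.List.pyGetD c j 0 + min (coin_helper q.1.1 q.2 (j - 2)) (coin_helper q.1.1 (q.2 + 1) (j - 1))))
    hlen hrows (by omega) (by omega)
  refine ⟨by simp [stepInner]; omega, ⟨?_, ?_, ?_⟩, ?_⟩
  · simpa [stepInner] using hslen
  · simpa [stepInner] using hsrows
  · intro i' j' ha0 haN hb0 hbN
    simp only [stepInner]
    rw [h1, h2, h3, hmax,
        tget_set c q.1.1 q.2 j _ hlen hrows (by omega) (by omega) (by omega) hjN i' j'
          ha0 haN hb0 hbN]
    by_cases hc : i' = q.2 ∧ j' = j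
    · rw [if_pos hc, if_pos (by omega), hc.1, hc.2]
    · rw [if_neg hc, htab.2.2 i' j' ha0 haN hb0 hbN]
      split_ifs with hA hB hB
      · rfl
      · exfalso; omega
      · exfalso; omega
      · rfl
  · intro _
    simp only [stepInner]
    rw [h1, h2, h3]
    constructor
    · show _ = lvalc c (j + 1 - 1 - g) (j + 1 - 1)
      unfold lvalc
      rw [show j + 1 - 1 = j by ring, hqi]
    · show _ = rvalc c (j + 1 - 1 - g) (j + 1 - 1)
      unfold rvalc
      rw [show j + 1 - 1 = j by ring, hqi]

def PoutA (c : List Int) (g : Int) (s : List (List Int) × Int × Int) : Prop :=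
  tabOK c s.1 g g ∧
  (1 ≤ g → (s.2.1 = lvalc c ((c.length : Int) - g) ((c.length : Int) - 1) ∧
            s.2.2 = rvalc c ((c.length : Int) - g) ((c.length : Int) - 1)))

theorem tabOK_shift (c : List Int) (t : List (List Int)) (g : Int) (hg : 0 ≤ g)
    (h : tabOK c t g (c.length : Int)) : tabOK c t (g + 1) (g + 1) := by
  refine ⟨h.1, h.2.1, ?_⟩
  intro i j hi0 hiN hj0 hjN
  rw [h.2.2 i j hi0 hiN hj0 hjN]
  split_ifs with hA hB hB
  · rfl
  · exfalso; omega
  · exfalso; omega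
  · rfl

theorem stepA_inv (c : List Int) (g : Int) (hg : 0 ≤ g) (hgN : g < (c.length : Int))
    (s : List (List Int) × Int × Int) (hs : PoutA c g s) :
    PoutA c (g + 1) (stepA c (c.length : Int) s g) := by
  have hinner := foldl_range_inv (stepInner c (c.length : Int)) (PinA c g) g (c.length : Int)
    (fun j st hgj hjN hP => stepInner_inv c g j hg hgj hjN st hP)
    ((c.length : Int) - g).toNat g le_rfl (by omega) rfl (s, 0)
    ⟨by simp, hs.1, fun h => absurd h (by omega)⟩
  obtain ⟨_, htab, hlr⟩ := hinner
  have hlrX := hlr (by omega)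
  refine ⟨?_, fun _ => ?_⟩
  · exact tabOK_shift c _ g hg htab
  · rw [show (c.length : Int) - (g + 1) = (c.length : Int) - 1 - g by ring]
    exact hlrX

theorem Aloop (c : List Int) (hN : 3 ≤ (c.length : Int)) :
    PoutA c (c.length : Int)
      ((PySem.List.pyRange 0 (c.length : Int) 1).foldl (stepA c (c.length : Int)) (temp0 c, 0, 0)) := by
  have h := foldl_range_inv (stepA c (c.length : Int)) (PoutA c) 0 (c.length : Int)
    (fun g st h0 hlt hP => stepA_inv c g h0 hlt st hP)
    ((c.length : Int) - 0).toNat 0 le_rfl (by omega) rfl (temp0 c, 0, 0)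
    (by exact ⟨tabOK_init c, by omega⟩)
  exact h

-- ================= B side =================
def diagL (c : List Int) (g : Int) : List Int :=
  (PySem.List.pyRange 0 ((c.length : Int) - g) 1).map (fun i => recV c i (i + g))

def bInit (c : List Int) : List Int :=
  if PySem.Int.mod ((c.length : Int) - 1) 2 = 0 then c
  else (PySem.List.pyRange 0 ((c.length : Int) - 1) 1).map
    (fun i => max (PySem.List.pyGetD c i 0) (PySem.List.pyGetD c (i + 1) 0))

def stepB (c : List Int) (n : Int) (s : List Int × List Int) (g : Int) : List Int × List Int :=
  let p := s.2
  (p, (PySem.List.pyRange 0 (n - g) 1).map (fun i =>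
    max (PySem.List.pyGetD c i 0 +
          min (PySem.List.pyGetD p (i + 1) 0) (PySem.List.pyGetD p (i + 2) 0))
        (PySem.List.pyGetD c (i + g) 0 +
          min (PySem.List.pyGetD p i 0) (PySem.List.pyGetD p (i + 1) 0))))

theorem coin_game_alt_eq (c : List Int) (h1 : ¬ ((c.length : Int) = 1)) (h2 : ¬ ((c.length : Int) = 2)) :
    coin_game_alt c =
      (PySem.List.pyGetD
         ((PySem.List.pyRange (PySem.Int.mod ((c.length : Int) - 1) 2 + 2) (c.length : Int) 2).foldl
           (stepB c (c.length : Int)) (bInit c, bInit c)).2 0 0,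
       dirOf
         (PySem.List.pyGetD c 0 0 +
           min (PySem.List.pyGetD ((PySem.List.pyRange (PySem.Int.mod ((c.length : Int) - 1) 2 + 2)
                   (c.length : Int) 2).foldl (stepB c (c.length : Int)) (bInit c, bInit c)).1 1 0)
               (PySem.List.pyGetD ((PySem.List.pyRange (PySem.Int.mod ((c.length : Int) - 1) 2 + 2)
                   (c.length : Int) 2).foldl (stepB c (c.length : Int)) (bInit c, bInit c)).1 2 0))
         (PySem.List.pyGetD c ((c.length : Int) - 1) 0 +
           min (PySem.List.pyGetD ((PySem.List.pyRange (PySem.Int.mod ((c.length : Int) - 1) 2 + 2)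
                   (c.length : Int) 2).foldl (stepB c (c.length : Int)) (bInit c, bInit c)).1 0 0)
               (PySem.List.pyGetD ((PySem.List.pyRange (PySem.Int.mod ((c.length : Int) - 1) 2 + 2)
                   (c.length : Int) 2).foldl (stepB c (c.length : Int)) (bInit c, bInit c)).1 1 0))) := by
  simp only [coin_game_alt, if_neg h1, if_neg h2]
  rfl

theorem diagL_zero (c : List Int) : diagL c 0 = c := by
  unfold diagL
  rw [List.map_congr_left (g := fun i => PySem.List.pyGetD c i 0)
      (fun i _ => by rw [show i + 0 = i by ring, recV_diag0])]
  rw [show (c.length : Int) - 0 = (c.length : Int) by ring]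
  exact PySem.List.map_pyGetD_pyRange_zero' c 0

theorem diagL_one (c : List Int) :
    (PySem.List.pyRange 0 ((c.length : Int) - 1) 1).map
      (fun i => max (PySem.List.pyGetD c i 0) (PySem.List.pyGetD c (i + 1) 0)) = diagL c 1 := by
  unfold diagL
  exact List.map_congr_left (fun i _ => (recV_diag1 c i).symm)

theorem pyGetD_diagL (c : List Int) (g k : Int) (h0 : 0 ≤ k) (hk : k < (c.length : Int) - g) :
    PySem.List.pyGetD (diagL c g) k 0 = recV c k (k + g) := by
  unfold diagL
  exact PySem.List.pyGetD_map_pyRange_of_nonneg _ _ _ _ h0 hk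

theorem diag_step (c : List Int) (g : Int) (p : List Int) (h2 : 2 ≤ g) (hg : g < (c.length : Int)) :
    stepB c (c.length : Int) (p, diagL c (g - 2)) g = (diagL c (g - 2), diagL c g) := by
  unfold stepB diagL
  refine Prod.ext rfl ?_
  apply List.map_congr_left
  intro i hi
  rw [PySem.List.mem_pyRange_one] at hi
  rw [PySem.List.pyGetD_map_pyRange_of_nonneg _ _ _ _ (by omega) (by omega),
      PySem.List.pyGetD_map_pyRange_of_nonneg _ _ _ _ (by omega) (by omega),
      PySem.List.pyGetD_map_pyRange_of_nonneg _ _ _ _ (by omega) (by omega)]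
  conv_rhs => rw [recV]
  rw [if_pos (by omega)]
  rw [show i + 1 + (g - 2) = i + g - 1 by ring, show i + 2 + (g - 2) = i + g by ring,
      show i + (g - 2) = i + g - 2 by ring]

theorem bloop (c : List Int) :
    ∀ (m : Nat) (g : Int), 2 ≤ g → g < (c.length : Int) → ((c.length : Int) - 1 - g) % 2 = 0 →
      ((c.length : Int) - g).toNat = m → ∀ p : List Int,
      (PySem.List.pyRange g (c.length : Int) 2).foldl (stepB c (c.length : Int)) (p, diagL c (g - 2)) =
        (diagL c ((c.length : Int) - 3), diagL c ((c.length : Int) - 1)) := by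
  intro m
  induction m using Nat.strong_induction_on with
  | _ m ih =>
    intro g h2 hg hpar hm p
    rw [pyRange_two_cons g _ hg]
    simp only [List.foldl_cons]
    rw [diag_step c g p h2 hg]
    by_cases hl : g + 2 < (c.length : Int)
    · have hrec := ih ((c.length : Int) - (g + 2)).toNat (by omega) (g + 2) (by omega) hl
        (by omega) rfl (diagL c (g - 2))
      rw [show g + 2 - 2 = g by ring] at hrec
      exact hrec
    · rw [pyRange_two_nil (g + 2) _ (by omega)]
      simp only [List.foldl_nil]
      have hg2 : g = (c.length : Int) - 1 := by omega
      rw [hg2, show (c.length : Int) - 1 - 2 = (c.length : Int) - 3 by ring]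

-- ===== VERDICT (by name: the statement is the Claim_ definition above) =====
theorem coin_game_spec : Claim_equal_coin_game := by
  intro coins _ hpre
  unfold Spec_coin_game
  by_cases h1 : (coins.length : Int) = 1
  · simp only [coin_game, coin_game_alt, if_pos h1]
  · by_cases h2 : (coins.length : Int) = 2
    · simp only [coin_game, coin_game_alt, if_neg h1, if_pos h2]
      split_ifs <;> rfl
    · have hlen0 : coins.length ≠ 0 := fun h => hpre (List.eq_nil_of_length_eq_zero h)
      have hN : 3 ≤ (coins.length : Int) := by omega
      rw [coin_game_eq coins h1 h2, coin_game_alt_eq coins h1 h2]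
      obtain ⟨htab, hlr⟩ := Aloop coins hN
      have hl := (hlr (by omega)).1
      have hr := (hlr (by omega)).2
      have hmodfacts := PySem.Int.floordiv_mul_add_mod ((coins.length : Int) - 1) 2
      have hmod0 : 0 ≤ PySem.Int.mod ((coins.length : Int) - 1) 2 :=
        PySem.Int.mod_nonneg _ (by norm_num)
      have hmod2 : PySem.Int.mod ((coins.length : Int) - 1) 2 < 2 :=
        PySem.Int.mod_lt _ (by norm_num)
      have hcur0 : bInit coins = diagL coins (PySem.Int.mod ((coins.length : Int) - 1) 2) := by
        unfold bInit
        by_cases hs : PySem.Int.mod ((coins.length : Int) - 1) 2 = 0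
        · rw [if_pos hs, hs, diagL_zero]
        · have hs1 : PySem.Int.mod ((coins.length : Int) - 1) 2 = 1 := by omega
          rw [if_neg hs, hs1]
          exact diagL_one coins
      rw [hcur0]
      have hb := bloop coins
        ((coins.length : Int) - (PySem.Int.mod ((coins.length : Int) - 1) 2 + 2)).toNat
        (PySem.Int.mod ((coins.length : Int) - 1) 2 + 2)
        (by omega) (by omega) (by omega) rfl
        (diagL coins (PySem.Int.mod ((coins.length : Int) - 1) 2))
      rw [show PySem.Int.mod ((coins.length : Int) - 1) 2 + 2 - 2
            = PySem.Int.mod ((coins.length : Int) - 1) 2 by ring] at hb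
      rw [hb]
      have e1 : PySem.List.pyGetD (diagL coins ((coins.length : Int) - 1)) 0 0
          = recV coins 0 ((coins.length : Int) - 1) := by
        rw [pyGetD_diagL coins _ 0 le_rfl (by omega), zero_add]
      have e2 : PySem.List.pyGetD (diagL coins ((coins.length : Int) - 3)) 0 0
          = recV coins 0 ((coins.length : Int) - 3) := by
        rw [pyGetD_diagL coins _ 0 le_rfl (by omega), zero_add]
      have e3 : PySem.List.pyGetD (diagL coins ((coins.length : Int) - 3)) 1 0
          = recV coins 1 ((coins.length : Int) - 2) := by
        rw [pyGetD_diagL coins _ 1 (by omega) (by omega),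
            show 1 + ((coins.length : Int) - 3) = (coins.length : Int) - 2 by ring]
      have e4 : PySem.List.pyGetD (diagL coins ((coins.length : Int) - 3)) 2 0
          = recV coins 2 ((coins.length : Int) - 1) := by
        rw [pyGetD_diagL coins _ 2 (by omega) (by omega),
            show 2 + ((coins.length : Int) - 3) = (coins.length : Int) - 1 by ring]
      have eA : tget ((PySem.List.pyRange 0 ((coins.length : Int)) 1).foldl
            (stepA coins ((coins.length : Int))) (temp0 coins, 0, 0)).1 0 ((coins.length : Int) - 1)
          = recV coins 0 ((coins.length : Int) - 1) := by
        rw [htab.2.2 0 ((coins.length : Int) - 1) le_rfl (by omega) (by omega) (by omega),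
            if_pos (by omega)]
      have eL : lvalc coins ((coins.length : Int) - (coins.length : Int)) ((coins.length : Int) - 1)
          = PySem.List.pyGetD coins 0 0 +
            min (recV coins 1 ((coins.length : Int) - 2)) (recV coins 2 ((coins.length : Int) - 1)) := by
        unfold lvalc
        rw [show (coins.length : Int) - (coins.length : Int) = 0 by ring]
        rw [show (0 : Int) + 1 = 1 by ring, show (0 : Int) + 2 = 2 by ring,
            show (coins.length : Int) - 1 - 1 = (coins.length : Int) - 2 by ring]
      have eR : rvalc coins ((coins.length : Int) - (coins.length : Int)) ((coins.length : Int) - 1)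
          = PySem.List.pyGetD coins ((coins.length : Int) - 1) 0 +
            min (recV coins 0 ((coins.length : Int) - 3)) (recV coins 1 ((coins.length : Int) - 2)) := by
        unfold rvalc
        rw [show (coins.length : Int) - (coins.length : Int) = 0 by ring]
        rw [show (0 : Int) + 1 = 1 by ring,
            show (coins.length : Int) - 1 - 2 = (coins.length : Int) - 3 by ring,
            show (coins.length : Int) - 1 - 1 = (coins.length : Int) - 2 by ring]
      simp only [eA, e1, e2, e3, e4]
      rw [hl, hr, eL, eR]
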